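-- pv_equiv track=rewrite | github.com/coderop2/Stitching-Warping-Transformation-Create_Panorama | part1-experiments.py | get_tn_count
-- ===== SOURCE A (Python) =====
-- def get_tn_count(l1, l2):
-- 	tn = 0
-- 	n1 = len(l1)
-- 	n2 = len(l2)
-- 	for i in range(n1):
-- 		for j in range(n2):
-- 			if (l1[i].split('_')[0] != l2[j].split('_')[0]):
-- 				tn = tn + 1
-- 	return tn
-- ===== SOURCE B (Python) =====
-- def get_tn_count(l1, l2):
--     c2 = {}
--     for s in l2:
--         p = s.split('_')[0]
--         c2[p] = c2.get(p, 0) + 1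
--     matches = 0
--     for s in l1:
--         matches = matches + c2.get(s.split('_')[0], 0)
--     return len(l1) * len(l2) - matches
-- ===== Notes on version B (the rewrite author's own statement) =====
-- stated objective: faster
-- what changed: Replaces the quadratic all-pairs comparison with a single pass that counts underscore-prefixes of l2 in a dict and computes tn = len(l1)*len(l2) minus the sum of matching counts.
import Mathlib
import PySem

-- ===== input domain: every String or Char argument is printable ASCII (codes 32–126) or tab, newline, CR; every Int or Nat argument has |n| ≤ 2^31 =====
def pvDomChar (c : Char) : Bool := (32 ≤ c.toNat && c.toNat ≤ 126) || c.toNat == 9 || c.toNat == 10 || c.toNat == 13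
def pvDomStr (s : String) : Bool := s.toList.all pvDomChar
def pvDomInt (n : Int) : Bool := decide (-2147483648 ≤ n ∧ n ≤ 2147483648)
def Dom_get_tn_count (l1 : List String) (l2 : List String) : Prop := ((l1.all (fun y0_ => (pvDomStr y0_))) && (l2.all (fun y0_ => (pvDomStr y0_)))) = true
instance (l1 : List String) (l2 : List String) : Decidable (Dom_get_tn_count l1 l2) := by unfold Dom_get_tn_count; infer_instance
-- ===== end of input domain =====

-- B replaces A's quadratic all-pairs comparison by a dict of prefix counts over l2 and the identity tn = n1*n2 - mtch (asymptotically faster).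


-- s.split('_')[0] (split with a nonempty separator always yields at least one piece, so index 0 is in range)
def pvPrefix (s : String) : String := PySem.List.pyGetD ((PySem.Str.split? s "_").getD []) 0 ""

-- ===== PORT A =====
def get_tn_count (l1 : List String) (l2 : List String) : Int :=
  let n1 : Int := l1.length
  let n2 : Int := l2.length
  (PySem.List.pyRange 0 n1 1).foldl (fun tn i =>
    (PySem.List.pyRange 0 n2 1).foldl (fun tn j =>
      if pvPrefix (PySem.List.pyGetD l1 i "") ≠ pvPrefix (PySem.List.pyGetD l2 j "") then tn + 1 else tn) tn) 0

-- ===== PORT B =====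
def get_tn_count_alt (l1 : List String) (l2 : List String) : Int :=
  let c2 : PySem.Dict String Int :=
    l2.foldl (fun d s => d.insert (pvPrefix s) (d.getD (pvPrefix s) 0 + 1)) PySem.Dict.empty
  let mtch : Int := l1.foldl (fun m s => m + c2.getD (pvPrefix s) 0) 0
  (l1.length : Int) * (l2.length : Int) - mtch

-- ===== PRECONDITION & SPEC =====
def Spec_get_tn_count (l1 : List String) (l2 : List String) (out : Int) : Prop := out = get_tn_count_alt l1 l2
instance (l1 : List String) (l2 : List String) (out : Int) : Decidable (Spec_get_tn_count l1 l2 out) := by unfold Spec_get_tn_count; infer_instance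

-- ===== CLAIM (what is proved, stated in full; the proofs are below) =====
def Claim_equal_get_tn_count : Prop := ∀ (l1 : List String) (l2 : List String), Dom_get_tn_count l1 l2 → Spec_get_tn_count l1 l2 (get_tn_count l1 l2)

-- ===== LEMMAS AND PROOFS =====

-- the count in B's dict is the number of elements of l2 with this prefix
theorem pv_getD_counter (l2 : List String) (p : String) :
    (l2.foldl (fun d s => d.insert (pvPrefix s) (d.getD (pvPrefix s) 0 + 1)) PySem.Dict.empty).getD p 0
      = ((l2.map pvPrefix).count p : Int) := by
  rw [← List.foldl_map (f := pvPrefix)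
        (g := fun (d : PySem.Dict String Int) x => d.insert x (d.getD x 0 + 1))]
  simpa using PySem.Dict.getD_foldl_insert_add_one (l := l2.map pvPrefix)
    (d := PySem.Dict.empty) (v := p)

-- A's inner index loop over range(len(l2)) is the structural fold over l2
theorem pv_inner_range (l2 : List String) (x : String) (t : Int) :
    (PySem.List.pyRange 0 (l2.length : Int) 1).foldl
        (fun tn j => if pvPrefix x ≠ pvPrefix (PySem.List.pyGetD l2 j "") then tn + 1 else tn) t
      = l2.foldl (fun tn y => if pvPrefix x ≠ pvPrefix y then tn + 1 else tn) t :=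
  PySem.List.foldl_pyRange_zero_pyGetD' l2 ""
    (fun tn y => if pvPrefix x ≠ pvPrefix y then tn + 1 else tn) t

-- A's inner loop over l2 adds n2 minus the number of matching prefixes
theorem pv_inner (x : String) (l2 : List String) (t : Int) :
    l2.foldl (fun tn y => if pvPrefix x ≠ pvPrefix y then tn + 1 else tn) t
      = t + (l2.length : Int) - ((l2.map pvPrefix).count (pvPrefix x) : Int) := by
  induction l2 generalizing t with
  | nil => simp
  | cons y ys ih =>
    rw [List.foldl_cons]
    by_cases h : pvPrefix x = pvPrefix y
    · rw [if_neg (by simp [h]), ih]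
      have hc : (List.map pvPrefix (y :: ys)).count (pvPrefix x)
          = (List.map pvPrefix ys).count (pvPrefix x) + 1 := by
        simp [List.count_cons, h]
      rw [hc]
      simp only [List.length_cons]
      push_cast
      ring
    · rw [if_pos (by simpa using h), ih]
      have hc : (List.map pvPrefix (y :: ys)).count (pvPrefix x)
          = (List.map pvPrefix ys).count (pvPrefix x) := by
        simp [List.count_cons, Ne.symm h]
      rw [hc]
      simp only [List.length_cons]
      push_cast
      ring

-- A's outer loop: t plus n1*n2 minus the total number of matching cross-pairs
theorem pv_outer (l1 l2 : List String) (t : Int) :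
    l1.foldl (fun tn x =>
        l2.foldl (fun tn y => if pvPrefix x ≠ pvPrefix y then tn + 1 else tn) tn) t
      = t + (l1.length : Int) * (l2.length : Int)
          - (l1.map (fun x => ((l2.map pvPrefix).count (pvPrefix x) : Int))).sum := by
  induction l1 generalizing t with
  | nil => simp
  | cons x xs ih =>
    rw [List.foldl_cons, pv_inner, ih]
    simp only [List.map_cons, List.sum_cons, List.length_cons]
    push_cast
    ring

-- ===== VERDICT (by name: the statement is the Claim_ definition above) =====
theorem get_tn_count_spec : Claim_equal_get_tn_count := by
  intro l1 l2 _
  show get_tn_count l1 l2 = get_tn_count_alt l1 l2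
  unfold get_tn_count get_tn_count_alt
  rw [PySem.List.foldl_pyRange_zero_pyGetD' l1 ""
        (fun tn s => (PySem.List.pyRange 0 (l2.length : Int) 1).foldl
          (fun tn j => if pvPrefix s ≠ pvPrefix (PySem.List.pyGetD l2 j "") then tn + 1 else tn) tn) 0]
  simp only [pv_inner_range, pv_outer, pv_getD_counter, PySem.List.foldl_add]
  ring
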